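-- pv_equiv track=rewrite | github.com/agolan12/Scisco-Genetics | amplicon_ruleset/categorize_alleles_old.py | divide_bucket
-- ===== SOURCE A (Python) =====
-- from typing import Dict, Set, List, Tuple
--
-- def divide_bucket(index: int, seq_bucket: Set[str], fastq_data: Dict[str, str]):
--     """
--     Return sets of ids, divided according to their base at the given index.
--
--     Parameters
--     ----------
--     index : int
--         base index
--     seq_bucket : Set[str]
--         set of ids
--     fastq_data : Dict[str, str]
--         dictionary with keys --> id, values --> sequence
--
--     Returns
--     -------
--     Set[str] -> a_set
--         set of ids with 'A' at the given index
--     Set[str] -> c_set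
--         set of ids with 'C' at the given index
--     Set[str] -> g_set
--         set of ids with 'G' at the given index
--     Set[str] -> t_set
--         set of ids with 'T' at the given index
--     """
--
--     a_set = set()
--     c_set = set()
--     g_set = set()
--     t_set = set()
--     for sequence_id in seq_bucket:
--         sequence = fastq_data[sequence_id]
--         if sequence[index] == 'A':
--             a_set.add(sequence_id)
--         elif sequence[index] == 'C':
--             c_set.add(sequence_id)
--         elif sequence[index] == 'G':
--             g_set.add(sequence_id)
--         elif sequence[index] == 'T':
--             t_set.add(sequence_id)
--     return a_set, c_set, g_set, t_set
-- ===== SOURCE B (Python) =====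
-- def divide_bucket(index, seq_bucket, fastq_data):
--     # Four independent set comprehensions, one filtering pass per base,
--     # instead of A's single branching loop with four mutable accumulators.
--     a_set = {sid for sid in seq_bucket if fastq_data[sid][index] == 'A'}
--     c_set = {sid for sid in seq_bucket if fastq_data[sid][index] == 'C'}
--     g_set = {sid for sid in seq_bucket if fastq_data[sid][index] == 'G'}
--     t_set = {sid for sid in seq_bucket if fastq_data[sid][index] == 'T'}
--     return a_set, c_set, g_set, t_set
-- ===== Notes on version B (the rewrite author's own statement) =====
-- stated objective: simpler
-- what changed: Replaces the single branching loop with four mutable set accumulators by four independent set comprehensions, one filtering pass per base.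
import Mathlib
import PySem

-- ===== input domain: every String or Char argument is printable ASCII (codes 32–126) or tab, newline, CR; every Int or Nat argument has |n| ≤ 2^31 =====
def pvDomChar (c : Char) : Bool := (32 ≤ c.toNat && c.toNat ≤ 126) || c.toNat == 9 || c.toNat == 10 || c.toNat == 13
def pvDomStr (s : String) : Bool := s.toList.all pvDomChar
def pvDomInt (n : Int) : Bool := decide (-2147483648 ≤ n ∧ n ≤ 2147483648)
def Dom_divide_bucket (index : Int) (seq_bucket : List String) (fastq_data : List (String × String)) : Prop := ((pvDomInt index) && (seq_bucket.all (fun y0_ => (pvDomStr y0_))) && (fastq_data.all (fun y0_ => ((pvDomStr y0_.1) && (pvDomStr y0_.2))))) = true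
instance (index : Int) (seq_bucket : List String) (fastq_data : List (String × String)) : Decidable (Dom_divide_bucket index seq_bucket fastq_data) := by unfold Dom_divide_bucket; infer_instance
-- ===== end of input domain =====

-- B replaces A's single branching loop (four mutable set accumulators) by four
-- independent set comprehensions, one filtering pass per base: simpler, same cost.

-- ===== PORT A =====
-- fastq_data[sequence_id][index]: KeyError / IndexError become `none` (Pre_ excludes those
-- inputs; on `none` every `==` test is False here, so the loop body falls through).
def pvLoopBody (index : Int) (fastq_data : List (String × String))
    (st : List String × List String × List String × List String) (sequence_id : String) :
    List String × List String × List String × List String :=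
  -- sequence = fastq_data[sequence_id]; base = sequence[index] (none = KeyError/IndexError, excluded by Pre_)
  let base := (PySem.Dict.get? (PySem.Dict.mk fastq_data) sequence_id).bind
                (fun sequence => PySem.Str.pyGet? sequence index)
  if base == some 'A' then (PySem.Set.add st.1 sequence_id, st.2.1, st.2.2.1, st.2.2.2)
  else if base == some 'C' then (st.1, PySem.Set.add st.2.1 sequence_id, st.2.2.1, st.2.2.2)
  else if base == some 'G' then (st.1, st.2.1, PySem.Set.add st.2.2.1 sequence_id, st.2.2.2)
  else if base == some 'T' then (st.1, st.2.1, st.2.2.1, PySem.Set.add st.2.2.2 sequence_id)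
  else st

def divide_bucket (index : Int) (seq_bucket : List String) (fastq_data : List (String × String)) : List String × List String × List String × List String :=
  seq_bucket.foldl (pvLoopBody index fastq_data)
    (PySem.Set.empty, PySem.Set.empty, PySem.Set.empty, PySem.Set.empty)

-- ===== PORT B =====
-- one set comprehension {sid for sid in seq_bucket if fastq_data[sid][index] == b}
def pvComprehension (index : Int) (seq_bucket : List String) (fastq_data : List (String × String)) (b : Char) : List String :=
  PySem.Set.ofList (seq_bucket.filter (fun sid =>
    (PySem.Dict.get? (PySem.Dict.mk fastq_data) sid).bind (fun s => PySem.Str.pyGet? s index) == some b))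

def divide_bucket_alt (index : Int) (seq_bucket : List String) (fastq_data : List (String × String)) : List String × List String × List String × List String :=
  (pvComprehension index seq_bucket fastq_data 'A',
   pvComprehension index seq_bucket fastq_data 'C',
   pvComprehension index seq_bucket fastq_data 'G',
   pvComprehension index seq_bucket fastq_data 'T')

-- ===== PRECONDITION & SPEC =====
-- Pre_ excludes exactly the inputs where Python A raises: an id of seq_bucket missing from
-- fastq_data (KeyError) or whose sequence has no base at `index` (IndexError).
def Pre_divide_bucket (index : Int) (seq_bucket : List String) (fastq_data : List (String × String)) : Prop :=
  (seq_bucket.all (fun sid =>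
    ((PySem.Dict.get? (PySem.Dict.mk fastq_data) sid).map
      (fun s => decide (PySem.Raise.InRange s.toList.length index))).getD false)) = true
instance (index : Int) (seq_bucket : List String) (fastq_data : List (String × String)) : Decidable (Pre_divide_bucket index seq_bucket fastq_data) := by unfold Pre_divide_bucket; infer_instance

def pvWitness_divide_bucket : Int × List String × (List (String × String)) :=
  (1, ["r1", "r2", "r3"], [("r1", "ACGT"), ("r2", "GGTA"), ("r3", "TCAA")])

def Spec_divide_bucket (index : Int) (seq_bucket : List String) (fastq_data : List (String × String)) (out : List String × List String × List String × List String) : Prop := out = divide_bucket_alt index seq_bucket fastq_data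
instance (index : Int) (seq_bucket : List String) (fastq_data : List (String × String)) (out : List String × List String × List String × List String) : Decidable (Spec_divide_bucket index seq_bucket fastq_data out) := by unfold Spec_divide_bucket; infer_instance

-- ===== CLAIM (what is proved, stated in full; the proofs are below) =====
def Claim_equal_divide_bucket : Prop := ∀ (index : Int) (seq_bucket : List String) (fastq_data : List (String × String)), Dom_divide_bucket index seq_bucket fastq_data → Pre_divide_bucket index seq_bucket fastq_data → Spec_divide_bucket index seq_bucket fastq_data (divide_bucket index seq_bucket fastq_data)

-- ===== LEMMAS AND PROOFS =====

-- the base A's loop reads for an id (and B's comprehensions test)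
def pvBase (index : Int) (fastq_data : List (String × String)) (sid : String) : Option Char :=
  (PySem.Dict.get? (PySem.Dict.mk fastq_data) sid).bind (fun s => PySem.Str.pyGet? s index)

-- loop invariant: A's fold from arbitrary accumulators = each accumulator folded with the filtered ids
theorem divide_bucket_fold_eq (index : Int) (fastq_data : List (String × String))
    (l : List String) (a c g t : List String) :
    l.foldl (pvLoopBody index fastq_data) (a, c, g, t)
    = ((l.filter (fun sid => pvBase index fastq_data sid == some 'A')).foldl PySem.Set.add a,
       (l.filter (fun sid => pvBase index fastq_data sid == some 'C')).foldl PySem.Set.add c,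
       (l.filter (fun sid => pvBase index fastq_data sid == some 'G')).foldl PySem.Set.add g,
       (l.filter (fun sid => pvBase index fastq_data sid == some 'T')).foldl PySem.Set.add t) := by
  induction l generalizing a c g t with
  | nil => rfl
  | cons x xs ih =>
    simp only [List.foldl_cons, List.filter_cons]
    have hstep : ∀ st, pvLoopBody index fastq_data st x =
        (if pvBase index fastq_data x == some 'A' then (PySem.Set.add st.1 x, st.2.1, st.2.2.1, st.2.2.2)
        else if pvBase index fastq_data x == some 'C' then (st.1, PySem.Set.add st.2.1 x, st.2.2.1, st.2.2.2)
        else if pvBase index fastq_data x == some 'G' then (st.1, st.2.1, PySem.Set.add st.2.2.1 x, st.2.2.2)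
        else if pvBase index fastq_data x == some 'T' then (st.1, st.2.1, st.2.2.1, PySem.Set.add st.2.2.2 x)
        else st) := fun st => rfl
    rw [hstep]
    by_cases hA : pvBase index fastq_data x = some 'A'
    · simp [hA, ih]
    · by_cases hC : pvBase index fastq_data x = some 'C'
      · simp [hC, ih]
      · by_cases hG : pvBase index fastq_data x = some 'G'
        · simp [hG, ih]
        · by_cases hT : pvBase index fastq_data x = some 'T'
          · simp [hT, ih]
          · simp [hA, hC, hG, hT, ih]

-- ===== VERDICT (by name: the statement is the Claim_ definition above) =====
theorem divide_bucket_spec : Claim_equal_divide_bucket := by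
  intro index seq_bucket fastq_data _ _
  unfold Spec_divide_bucket divide_bucket divide_bucket_alt pvComprehension
  rw [show (PySem.Set.empty, PySem.Set.empty, PySem.Set.empty, PySem.Set.empty)
      = (([], [], [], []) : List String × List String × List String × List String) from rfl,
    divide_bucket_fold_eq]
  simp only [PySem.Set.ofList_eq_foldl, pvBase]
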